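-- pv_equiv track=rewrite | github.com/najib105q/AdventOfCode | src/day06/part01.py | simulate_worksheet
-- ===== SOURCE A (Python) =====
-- from typing import List
--
-- def simulate_worksheet(lines: List[str]) -> int:
--     width = max(len(line) for line in lines)
--     col = 0
--     blocks = []
--     while col < width:
--         if all(line[col] == " " for line in lines):
--             col += 1
--             continue
--         start = col
--         while col < width and not all(line[col] == " " for line in lines):
--             col += 1
--         blocks.append((start, col))
--     total = 0
--     for start, end in blocks:
--         entries = [line[start:end].strip() for line in lines if line[start:end].strip()]
--         op = entries[-1]
--         nums = [int(x) for x in entries[:-1]]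
--         if op == "+":
--             total += sum(nums)
--         elif op == "*":
--             result = 1
--             for n in nums:
--                 result *= n
--             total += result
--     return total
-- ===== SOURCE B (Python) =====
-- from typing import List
--
--
-- def _eval_block(bufs: List[str]) -> int:
--     entries = [b.strip() for b in bufs if b.strip()]
--     op = entries[-1]
--     nums = [int(x) for x in entries[:-1]]
--     if op == "+":
--         return sum(nums)
--     if op == "*":
--         result = 1
--         for n in nums:
--             result *= n
--         return result
--     return 0
--
--
-- def simulate_worksheet(lines: List[str]) -> int:
--     width = max(len(line) for line in lines)
--     total = 0
--     bufs = None  # per-line character buffers of the block currently being read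
--     for c in range(width):
--         if all(line[c] == " " for line in lines):
--             if bufs is not None:
--                 total += _eval_block(bufs)
--                 bufs = None
--         else:
--             if bufs is None:
--                 bufs = ["" for _ in lines]
--             for i, line in enumerate(lines):
--                 bufs[i] += line[c:c+1]
--     if bufs is not None:
--         total += _eval_block(bufs)
--     return total
-- ===== Notes on version B (the rewrite author's own statement) =====
-- stated objective: alternative
-- what changed: A first materialises a list of (start,end) block index pairs with a two-level while-loop cursor and then re-slices every line per block; B never computes block boundaries at all: it streams the columns once, accumulating per-line character buffers for the block in progress and flushing (evaluating) them whenever an all-blank column or the end of input is reached.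
import Mathlib
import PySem

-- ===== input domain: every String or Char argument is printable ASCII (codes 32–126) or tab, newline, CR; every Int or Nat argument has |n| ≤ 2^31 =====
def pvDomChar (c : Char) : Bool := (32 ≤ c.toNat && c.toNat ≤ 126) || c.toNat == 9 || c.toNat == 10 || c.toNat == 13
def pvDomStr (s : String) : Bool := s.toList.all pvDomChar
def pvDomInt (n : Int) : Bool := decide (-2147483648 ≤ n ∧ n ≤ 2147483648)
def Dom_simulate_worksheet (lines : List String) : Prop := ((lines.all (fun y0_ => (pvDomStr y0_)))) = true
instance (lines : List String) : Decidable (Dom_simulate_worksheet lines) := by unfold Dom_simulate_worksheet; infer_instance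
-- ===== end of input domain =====

-- B replaces A's two-phase scheme (collect (start,end) block index pairs with a two-level
-- while-loop cursor, then re-slice every line per block) by a single streaming pass over the
-- columns that accumulates per-line character buffers and flushes them at blank columns / at the
-- end (objective: alternative decomposition, same per-block aggregation, no speed claim).

-- ===== PORT A =====

-- all(line[col] == " " for line in lines); getD's default is only reached where Python raises
-- IndexError (ragged lines, excluded by Pre_)
def colBlank (chars : List (List Char)) (c : Nat) : Bool :=
  chars.all (fun l => l.getD c ' ' == ' ')

-- the inner while loop: advance col while col < width and the column is not blank
def scanEnd (chars : List (List Char)) (width col : Nat) : Nat :=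
  if col < width then
    if colBlank chars col then col else scanEnd chars width (col + 1)
  else col
termination_by width - col

theorem scanEnd_ge (chars : List (List Char)) (width col : Nat) :
    col ≤ scanEnd chars width col := by
  induction col using scanEnd.induct chars width with
  | case1 col h hb => rw [scanEnd]; simp [h, hb]
  | case2 col h hb ih => rw [scanEnd]; simp [h, hb]; omega
  | case3 col h => rw [scanEnd]; simp [h]

-- the outer while loop collecting (start, end) blocks
def buildBlocks (chars : List (List Char)) (width col : Nat) : List (Nat × Nat) :=
  if col < width then
    if colBlank chars col then buildBlocks chars width (col + 1)
    else
      let e := scanEnd chars width (col + 1)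
      (col, e) :: buildBlocks chars width e
  else []
termination_by width - col
decreasing_by
  · omega
  · have := scanEnd_ge chars width (col + 1); omega

-- the body of A's 'for start, end in blocks' loop: the contribution of one block
-- (entries[-1] / int() are total via getD; the defaults are only reached where Python raises,
-- excluded by Pre_)
def blockValA (chars : List (List Char)) (s e : Nat) : Int :=
  let entries := chars.filterMap (fun l =>
    let t := PySem.Chars.strip (PySem.List.slice l (some (s : Int)) (some (e : Int)))
    if t.isEmpty then none else some t)
  let op := (PySem.List.pyGet? entries (-1)).getD []
  let nums := entries.dropLast.map (fun x => (PySem.Int.ofChars? x).getD 0)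
  if op == ['+'] then nums.foldl (· + ·) 0
  else if op == ['*'] then nums.foldl (fun r n => r * n) 1
  else 0

def simulate_worksheet (lines : List String) : Int :=
  let chars := lines.map (fun l => l.toList)
  let width := ((chars.map (fun l => l.length)).max?).getD 0
  (buildBlocks chars width 0).foldl (fun total b => total + blockValA chars b.1 b.2) 0

-- ===== PORT B =====

-- Source B's _eval_block: evaluate the accumulated per-line buffers of one block
-- (entries[-1] / int() total via getD as in Port A; defaults unreachable inside Pre_)
def evalBlock (bufs : List (List Char)) : Int :=
  let entries := bufs.filterMap (fun b =>
    let t := PySem.Chars.strip b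
    if t.isEmpty then none else some t)
  let op := (PySem.List.pyGet? entries (-1)).getD []
  let nums := entries.dropLast.map (fun x => (PySem.Int.ofChars? x).getD 0)
  if op == ['+'] then nums.foldl (· + ·) 0
  else if op == ['*'] then nums.foldl (fun r n => r * n) 1
  else 0

-- one iteration of Source B's 'for c in range(width)' loop; state = (total, bufs-or-None)
def stepB (chars : List (List Char)) (st : Int × Option (List (List Char))) (c : Nat) :
    Int × Option (List (List Char)) :=
  if colBlank chars c then
    match st.2 with
    | some bufs => (st.1 + evalBlock bufs, none)
    | none => st
  else
    let bufs := st.2.getD (chars.map (fun _ => []))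
    (st.1, some (List.zipWith
      (fun b l => b ++ PySem.List.slice l (some (c : Int)) (some ((c : Int) + 1))) bufs chars))

def simulate_worksheet_alt (lines : List String) : Int :=
  let chars := lines.map (fun l => l.toList)
  let width := ((chars.map (fun l => l.length)).max?).getD 0
  let st := (List.range width).foldl (stepB chars) ((0 : Int), none)
  match st.2 with
  | some bufs => st.1 + evalBlock bufs
  | none => st.1

-- ===== PRECONDITION & SPEC =====

def pvWidth (lines : List String) : Nat :=
  ((lines.map (fun l => l.toList.length)).max?).getD 0

def pvColBlank (lines : List String) (c : Nat) : Bool :=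
  lines.all (fun l => l.toList.getD c ' ' == ' ')

def pvEntries (lines : List String) (s e : Nat) : List (List Char) :=
  lines.filterMap (fun l =>
    let t := PySem.Chars.strip (PySem.List.slice l.toList (some (s : Int)) (some (e : Int)))
    if t.isEmpty then none else some t)

-- (s, e) is a maximal run of non-blank columns
def pvIsBlock (lines : List String) (s e : Nat) : Bool :=
  decide (s < e) && (s == 0 || pvColBlank lines (s - 1)) && (e == pvWidth lines || pvColBlank lines e)
    && (List.range' s (e - s)).all (fun c => !pvColBlank lines c)

-- the block's entry list is nonempty and its non-last entries parse as ints
def pvBlockOk (lines : List String) (s e : Nat) : Bool :=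
  !(pvEntries lines s e).isEmpty &&
    (pvEntries lines s e).dropLast.all (fun x => (PySem.Int.ofChars? x).isSome)

-- column c can be tested without IndexError: every line shorter than c+1 is preceded by a line
-- with a non-space at c, so all(line[c] == " " ...) short-circuits before indexing it
def pvColOk (lines : List String) (c : Nat) : Prop :=
  ∀ i, i < lines.length → ((lines.getD i "").toList.length ≤ c) →
    ∃ j, j < i ∧ (lines.getD j "").toList.getD c ' ' ≠ ' '

-- Pre_ excludes exactly the inputs on which A raises: the empty list (max() of an empty sequence,
-- ValueError), ragged input where a line shorter than some column is indexed before all() short-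
-- circuits (IndexError), a maximal non-blank column block whose stripped entries are all empty
-- (entries[-1] IndexError, reachable via tab columns), and non-last entries that int() rejects
-- (ValueError).
def Pre_simulate_worksheet (lines : List String) : Prop :=
  lines ≠ [] ∧ (∀ c, c < pvWidth lines → pvColOk lines c) ∧
  ∀ s, s < pvWidth lines → ∀ e, e < pvWidth lines + 1 →
    pvIsBlock lines s e = true → pvBlockOk lines s e = true

instance (lines : List String) : Decidable (Pre_simulate_worksheet lines) := by
  unfold Pre_simulate_worksheet pvColOk; infer_instance

def pvWitness_simulate_worksheet : List String := ["1 2", "2 3", "+ *"]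

def Spec_simulate_worksheet (lines : List String) (out : Int) : Prop :=
  out = simulate_worksheet_alt lines
instance (lines : List String) (out : Int) : Decidable (Spec_simulate_worksheet lines out) := by
  unfold Spec_simulate_worksheet; infer_instance

-- ===== CLAIM (what is proved, stated in full; the proofs are below) =====
def Claim_equal_simulate_worksheet : Prop := ∀ (lines : List String), Dom_simulate_worksheet lines → Pre_simulate_worksheet lines → Spec_simulate_worksheet lines (simulate_worksheet lines)

-- ===== LEMMAS AND PROOFS =====

-- the per-line buffers collected for columns [s, col) are exactly the slices line[s:col]
def slices (chars : List (List Char)) (s e : Nat) : List (List Char) :=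
  chars.map (fun l => PySem.List.slice l (some (s : Int)) (some (e : Int)))

-- the Python-after-the-loop flush: close the open block, if any
def pvFinish (st : Int × Option (List (List Char))) : Int :=
  match st.2 with
  | some bufs => st.1 + evalBlock bufs
  | none => st.1

theorem zipWith_self {α β : Type} (f : α → α → β) :
    ∀ l : List α, List.zipWith f l l = l.map (fun a => f a a) := by
  intro l
  induction l with
  | nil => rfl
  | cons x xs ih => simp

theorem slice_snoc (l : List Char) (s c : Nat) (h : s ≤ c) :
    PySem.List.slice l (some (s : Int)) (some (c : Int))
      ++ PySem.List.slice l (some (c : Int)) (some ((c : Int) + 1))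
      = PySem.List.slice l (some (s : Int)) (some ((c + 1 : Nat) : Int)) := by
  have h1 : ((c : Int) + 1) = (((c + 1 : Nat) : Int)) := by push_cast; ring
  rw [h1, PySem.List.slice_natCast, PySem.List.slice_natCast, PySem.List.slice_natCast]
  rw [show l.drop c = (l.drop s).drop (c - s) by rw [List.drop_drop]; congr 1; omega]
  rw [← List.take_add]
  congr 1
  omega

-- appending column c to buffers that hold the slices [s, c) yields the slices [s, c+1)
theorem append_col_slices (chars : List (List Char)) (s c : Nat) (h : s ≤ c) :
    List.zipWith
        (fun b l => b ++ PySem.List.slice l (some (c : Int)) (some ((c : Int) + 1)))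
        (slices chars s c) chars
      = slices chars s (c + 1) := by
  unfold slices
  rw [List.zipWith_map_left, zipWith_self]
  apply List.map_congr_left
  intro l _
  exact slice_snoc l s c h

-- evaluating the buffers of block [s, e) is A's per-block contribution
theorem evalBlock_slices (chars : List (List Char)) (s e : Nat) :
    evalBlock (slices chars s e) = blockValA chars s e := by
  unfold evalBlock blockValA slices
  rw [List.filterMap_map]
  rfl

theorem stepB_none_blank (chars : List (List Char)) (t : Int) (c : Nat)
    (hb : colBlank chars c = true) : stepB chars (t, none) c = (t, none) := by
  simp [stepB, hb]

theorem stepB_some_blank (chars : List (List Char)) (t : Int) (bufs : List (List Char)) (c : Nat)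
    (hb : colBlank chars c = true) :
    stepB chars (t, some bufs) c = (t + evalBlock bufs, none) := by
  simp [stepB, hb]

theorem stepB_none_nonblank (chars : List (List Char)) (t : Int) (c : Nat)
    (hb : colBlank chars c = false) :
    stepB chars (t, none) c = (t, some (slices chars c (c + 1))) := by
  simp only [stepB, hb, Bool.false_eq_true, if_false, Option.getD_none, Prod.mk.injEq, true_and]
  rw [show (chars.map (fun _ => ([] : List Char))) = slices chars c c by
    unfold slices
    apply List.map_congr_left
    intro l _
    rw [PySem.List.slice_natCast]
    simp]
  rw [append_col_slices chars c c (le_refl c)]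

theorem stepB_some_nonblank (chars : List (List Char)) (t : Int) (s c : Nat) (hs : s ≤ c)
    (hb : colBlank chars c = false) :
    stepB chars (t, some (slices chars s c)) c = (t, some (slices chars s (c + 1))) := by
  simp only [stepB, hb, Bool.false_eq_true, if_false, Option.getD_some, Prod.mk.injEq, true_and]
  rw [append_col_slices chars s c hs]

-- when state holds no open block, the rest of the column loop yields A's fold over buildBlocks;
-- when it holds the buffers of an open block started at s, it yields A's fold after closing the
-- block at scanEnd — joint induction on the remaining number of columns
theorem loop_eq (chars : List (List Char)) (width : Nat) : ∀ n : Nat,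
    (∀ col total, width - col ≤ n → col ≤ width →
      pvFinish ((List.range' col (width - col)).foldl (stepB chars) (total, none))
      = (buildBlocks chars width col).foldl (fun t b => t + blockValA chars b.1 b.2) total) ∧
    (∀ s col total, width - col ≤ n → s ≤ col → col ≤ width →
      pvFinish ((List.range' col (width - col)).foldl (stepB chars)
          (total, some (slices chars s col)))
      = (buildBlocks chars width (scanEnd chars width col)).foldl
          (fun t b => t + blockValA chars b.1 b.2)
          (total + blockValA chars s (scanEnd chars width col))) := by
  intro n
  induction n with
  | zero =>
    constructor
    · intro col total hn hc
      rw [show width - col = 0 by omega]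
      conv_rhs => rw [buildBlocks]
      rw [if_neg (by omega : ¬ col < width)]
      rfl
    · intro s col total hn hs hc
      rw [show width - col = 0 by omega]
      conv_rhs => rw [scanEnd, scanEnd]
      rw [if_neg (by omega : ¬ col < width)]
      conv_rhs => rw [buildBlocks]
      rw [if_neg (by omega : ¬ col < width)]
      simp [pvFinish, evalBlock_slices]
  | succ n ih =>
    constructor
    · intro col total hn hc
      rcases Nat.lt_or_ge col width with hlt | hge
      · rw [show width - col = (width - (col + 1)) + 1 by omega, List.range'_succ,
          List.foldl_cons]
        by_cases hb : colBlank chars col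
        · rw [stepB_none_blank chars total col hb]
          have hbb : buildBlocks chars width col = buildBlocks chars width (col + 1) := by
            rw [buildBlocks]; simp [hlt, hb]
          rw [hbb]
          exact ih.1 (col + 1) total (by omega) (by omega)
        · rw [Bool.not_eq_true] at hb
          rw [stepB_none_nonblank chars total col hb]
          have hbb : buildBlocks chars width col
              = (col, scanEnd chars width (col + 1))
                :: buildBlocks chars width (scanEnd chars width (col + 1)) := by
            rw [buildBlocks]; simp [hlt, hb]
          rw [hbb, List.foldl_cons]
          exact ih.2 col (col + 1) total (by omega) (by omega) (by omega)
      · rw [show width - col = 0 by omega]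
        conv_rhs => rw [buildBlocks]
        rw [if_neg (by omega : ¬ col < width)]
        rfl
    · intro s col total hn hs hc
      rcases Nat.lt_or_ge col width with hlt | hge
      · rw [show width - col = (width - (col + 1)) + 1 by omega, List.range'_succ,
          List.foldl_cons]
        by_cases hb : colBlank chars col
        · rw [stepB_some_blank chars total (slices chars s col) col hb]
          have hscan : scanEnd chars width col = col := by
            rw [scanEnd]; simp [hlt, hb]
          have hbb : buildBlocks chars width col = buildBlocks chars width (col + 1) := by
            rw [buildBlocks]; simp [hlt, hb]
          rw [hscan, hbb, evalBlock_slices]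
          exact ih.1 (col + 1) (total + blockValA chars s col) (by omega) (by omega)
        · rw [Bool.not_eq_true] at hb
          rw [stepB_some_nonblank chars total s col hs hb]
          have hscan : scanEnd chars width col = scanEnd chars width (col + 1) := by
            rw [scanEnd]; simp [hlt, hb]
          rw [hscan]
          exact ih.2 s (col + 1) total (by omega) (by omega) (by omega)
      · rw [show width - col = 0 by omega]
        conv_rhs => rw [scanEnd]
        rw [if_neg (by omega : ¬ col < width)]
        conv_rhs => rw [buildBlocks]
        rw [if_neg (by omega : ¬ col < width)]
        simp [pvFinish, evalBlock_slices]

theorem main_eq (lines : List String) :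
    simulate_worksheet lines = simulate_worksheet_alt lines := by
  simp only [simulate_worksheet, simulate_worksheet_alt]
  generalize lines.map (fun l => l.toList) = chars
  generalize ((chars.map (fun l => l.length)).max?).getD 0 = width
  rw [List.range_eq_range']
  have h := (loop_eq chars width width).1 0 0 (by omega) (by omega)
  rw [Nat.sub_zero] at h
  exact h.symm

-- ===== VERDICT (by name: the statement is the Claim_ definition above) =====
theorem simulate_worksheet_spec : Claim_equal_simulate_worksheet := by
  intro lines _ _
  unfold Spec_simulate_worksheet
  exact main_eq lines
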